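-- pv_equiv track=rewrite | github.com/ryanoneill/python3-leetcode | make_the_prefix_sum_non_negative.py | makePrefSumNonNegative
-- ===== SOURCE A (Python) =====
-- from typing import List
-- from heapq import heappush, heappop
--
-- def makePrefSumNonNegative(nums: List[int]) -> int:
--     sum = 0
--     result = 0
--     negs = []
--
--     for num in nums:
--         if num < 0:
--             heappush(negs, num)
--         sum += num
--         if sum < 0:
--             result += 1
--             sum -= heappop(negs)
--
--     return result
-- ===== SOURCE B (Python) =====
-- def makePrefSumNonNegative(nums):
--     sum = 0
--     result = 0
--     negs = []
--
--     for num in nums: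
--         if num < 0:
--             negs.append(num)
--         sum += num
--         if sum < 0:
--             result += 1
--             m = min(negs)
--             negs.remove(m)
--             sum -= m
--
--     return result
-- ===== Notes on version B (the rewrite author's own statement) =====
-- stated objective: simpler
-- what changed: Replaces the binary min-heap with a plain unsorted list of the negatives seen so far, scanning it with min() and remove() whenever the prefix sum dips below zero.
import Mathlib
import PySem

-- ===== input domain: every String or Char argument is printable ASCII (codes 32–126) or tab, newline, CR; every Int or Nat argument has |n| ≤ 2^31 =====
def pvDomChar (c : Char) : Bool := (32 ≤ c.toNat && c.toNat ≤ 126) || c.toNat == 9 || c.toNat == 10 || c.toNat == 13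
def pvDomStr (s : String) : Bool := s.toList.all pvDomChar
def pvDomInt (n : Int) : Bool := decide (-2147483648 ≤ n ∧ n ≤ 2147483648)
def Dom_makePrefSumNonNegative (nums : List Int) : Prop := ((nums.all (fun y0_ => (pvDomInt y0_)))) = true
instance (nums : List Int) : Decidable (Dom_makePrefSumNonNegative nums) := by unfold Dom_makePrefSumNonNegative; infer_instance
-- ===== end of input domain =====

-- B replaces A's binary min-heap by a plain unsorted list of negatives scanned with min()/remove() (simpler; same return value).
-- ===== PORT A =====
-- heapq is a library: heappush/heappop are ported observationally as a min-priority queue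
-- (insert keeping the list sorted; pop the head, i.e. the minimum) — the same observable
-- behaviour as Python's binary heap; the heap list is internal state, never returned.
def heapPush (h : List Int) (x : Int) : List Int := List.orderedInsert (· ≤ ·) x h

def heapPop (h : List Int) : Int × List Int :=
  match h with
  | [] => (0, [])   -- Python would raise IndexError here; this point is unreachable in A's loop
  | x :: t => (x, t)

def goA : List Int → Int → Int → List Int → Int
  | [], _, result, _ => result
  | num :: rest, sum, result, negs =>
      let negs1 := if num < 0 then heapPush negs num else negs
      let sum1 := sum + num
      if sum1 < 0 then
        let p := heapPop negs1
        goA rest (sum1 - p.1) (result + 1) p.2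
      else goA rest sum1 result negs1

def makePrefSumNonNegative (nums : List Int) : Int := goA nums 0 0 []

-- ===== PORT B =====
def goB : List Int → Int → Int → List Int → Int
  | [], _, result, _ => result
  | num :: rest, sum, result, negs =>
      let negs1 := if num < 0 then negs ++ [num] else negs
      let sum1 := sum + num
      if sum1 < 0 then
        -- min(negs) / negs.remove(m); negs1 is provably nonempty here, so the defaults are unreachable
        let m := (PySem.List.min? negs1 (fun x => x)).getD 0
        goB rest (sum1 - m) (result + 1) ((PySem.List.remove? negs1 m).getD negs1)
      else goB rest sum1 result negs1

def makePrefSumNonNegative_alt (nums : List Int) : Int := goB nums 0 0 []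

-- ===== PRECONDITION & SPEC =====
def Spec_makePrefSumNonNegative (nums : List Int) (out : Int) : Prop := out = makePrefSumNonNegative_alt nums
instance (nums : List Int) (out : Int) : Decidable (Spec_makePrefSumNonNegative nums out) := by unfold Spec_makePrefSumNonNegative; infer_instance

-- ===== CLAIM (what is proved, stated in full; the proofs are below) =====
def Claim_equal_makePrefSumNonNegative : Prop := ∀ (nums : List Int), Dom_makePrefSumNonNegative nums → Spec_makePrefSumNonNegative nums (makePrefSumNonNegative nums)

-- ===== LEMMAS AND PROOFS =====

-- Invariant relating the two loop states: A's heap list is sorted and a permutation of B's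
-- unsorted list of negatives; sum = P + (sum of that list) with P ≥ 0 (P = sum of the kept
-- non-negative prefix elements), so the list is nonempty whenever sum < 0.

-- the head of a sorted list is min() of any permutation of it
theorem min?_of_sorted_perm (m : Int) (t negs : List Int) (hp : (m :: t).Perm negs)
    (hs : (m :: t).Pairwise (· ≤ ·)) : PySem.List.min? negs (fun x => x) = some m := by
  obtain ⟨v, hv⟩ : ∃ v, PySem.List.min? negs (fun x => x) = some v := by
    rcases h : PySem.List.min? negs (fun x => x) with _ | v
    · rw [PySem.List.min?_eq_none_iff] at h
      subst h; exact absurd hp.symm (by simp)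
    · exact ⟨v, rfl⟩
  have hvm := PySem.List.min?_mem hv
  have hmin := PySem.List.min?_isMin hv
  have h1 : v ≤ m := hmin m (hp.mem_iff.mp (by simp))
  have h2 : m ≤ v := by
    rcases List.mem_cons.mp (hp.mem_iff.mpr hvm) with h | hvt
    · exact le_of_eq h.symm
    · exact (List.pairwise_cons.mp hs).1 v hvt
  rw [hv, le_antisymm h1 h2]

-- the pop branch: A pops the heap's root, B scans and removes the minimum — same value,
-- and the resulting states are again related
theorem pop_branch (rest : List Int) (s result : Int) (A1 B1 : List Int) (P1 : Int)
    (hsort : A1.Pairwise (· ≤ ·)) (hperm : A1.Perm B1)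
    (hneg : ∀ x ∈ B1, x < 0) (hP : 0 ≤ P1) (hsum : s = P1 + B1.sum) (hs : s < 0)
    (ih : ∀ (sum result P : Int) (hA negsB : List Int), hA.Pairwise (· ≤ ·) → hA.Perm negsB →
      (∀ x ∈ negsB, x < 0) → 0 ≤ P → sum = P + negsB.sum →
      goA rest sum result hA = goB rest sum result negsB) :
    goA rest (s - (heapPop A1).1) (result + 1) (heapPop A1).2
      = goB rest (s - ((PySem.List.min? B1 (fun x => x)).getD 0)) (result + 1)
          ((PySem.List.remove? B1 ((PySem.List.min? B1 (fun x => x)).getD 0)).getD B1) := by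
  rcases hA1 : A1 with _ | ⟨m, t⟩
  · -- impossible: the list is empty, so s = P1 ≥ 0
    subst hA1
    have : B1 = [] := hperm.nil_eq.symm
    subst this
    simp at hsum
    omega
  subst hA1
  have hmin : PySem.List.min? B1 (fun x => x) = some m := min?_of_sorted_perm m t B1 hperm hsort
  have hmB : m ∈ B1 := hperm.mem_iff.mp (by simp)
  have hrem : PySem.List.remove? B1 m = some (B1.erase m) := PySem.List.remove?_eq_some_erase B1 m hmB
  have hsumE : m + (B1.erase m).sum = B1.sum := List.sum_erase hmB
  rw [hmin]
  simp only [Option.getD_some, heapPop, hrem]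
  exact ih (s - m) (result + 1) P1 t (B1.erase m)
    ((List.pairwise_cons.mp hsort).2)
    (by have := hperm.erase m; rwa [List.erase_cons_head] at this)
    (fun x hx => hneg x (List.mem_of_mem_erase hx))
    hP (by omega)

theorem go_eq (rest : List Int) : ∀ (sum result P : Int) (hA negsB : List Int),
    hA.Pairwise (· ≤ ·) → hA.Perm negsB → (∀ x ∈ negsB, x < 0) →
    0 ≤ P → sum = P + negsB.sum →
    goA rest sum result hA = goB rest sum result negsB := by
  induction rest with
  | nil => intro _ _ _ _ _ _ _ _ _ _; rfl
  | cons num rest ih =>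
    intro sum result P hA negsB hsort hperm hneg hP hsum
    have f1 : (if num < 0 then heapPush hA num else hA).Pairwise (· ≤ ·) := by
      split
      · exact List.Pairwise.orderedInsert num hA hsort
      · exact hsort
    have f2 : (if num < 0 then heapPush hA num else hA).Perm
        (if num < 0 then negsB ++ [num] else negsB) := by
      split
      · exact ((List.perm_orderedInsert _ num hA).trans (hperm.cons num)).trans
          (List.perm_append_singleton num negsB).symm
      · exact hperm
    have f3 : ∀ x ∈ (if num < 0 then negsB ++ [num] else negsB), x < 0 := by
      split
      · intro x hx
        rcases List.mem_append.mp hx with h | h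
        · exact hneg x h
        · simp at h; omega
      · exact hneg
    have f4 : sum + num = (if num < 0 then P else P + num)
        + (if num < 0 then negsB ++ [num] else negsB).sum := by
      split
      · simp [List.sum_append]; omega
      · omega
    have f5 : 0 ≤ (if num < 0 then P else P + num) := by split <;> omega
    simp only [goA, goB]
    by_cases hs1 : sum + num < 0
    · simp only [if_pos hs1]
      exact pop_branch rest (sum + num) result _ _ _ f1 f2 f3 f5 f4 hs1 ih
    · simp only [if_neg hs1]
      exact ih (sum + num) result _ _ _ f1 f2 f3 f5 f4

-- ===== VERDICT (by name: the statement is the Claim_ definition above) =====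
theorem makePrefSumNonNegative_spec : Claim_equal_makePrefSumNonNegative := by
  intro nums _
  unfold Spec_makePrefSumNonNegative makePrefSumNonNegative makePrefSumNonNegative_alt
  exact go_eq nums 0 0 0 [] [] (List.Pairwise.nil) (List.Perm.refl _) (by simp) le_rfl (by simp)
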